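-- pv_equiv track=rewrite | github.com/ZeyadWaleed7/AI-Testdoc-Agent | ai_agent/documentation.py | _split_diff_into_chunks
-- ===== SOURCE A (Python) =====
-- from typing import Dict, List, Tuple, Optional
--
-- def _split_diff_into_chunks(diff_content: str) -> List[str]:
--     chunks = []
--     current_chunk = []
--
--     for line in diff_content.split('\n'):
--         if line.startswith('diff --git'):
--             if current_chunk:
--                 chunks.append('\n'.join(current_chunk))
--             current_chunk = [line]
--         else:
--             current_chunk.append(line)
--
--     if current_chunk:
--         chunks.append('\n'.join(current_chunk))
--
--     return chunks
-- ===== SOURCE B (Python) =====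
-- def _split_diff_into_chunks(diff_content: str):
--     lines = diff_content.split('\n')
--     marks = [i for i, line in enumerate(lines) if line.startswith('diff --git')]
--     if not marks:
--         return ['\n'.join(lines)]
--     bounds = marks + [len(lines)]
--     lead = ['\n'.join(lines[:marks[0]])] if marks[0] > 0 else []
--     return lead + ['\n'.join(lines[a:b]) for a, b in zip(bounds, bounds[1:])]
-- ===== Notes on version B (the rewrite author's own statement) =====
-- stated objective: alternative
-- what changed: Replaces A's single flushing-accumulator loop (carrying chunks + current_chunk) by a two-pass shape: first build an index table of 'diff --git' boundary line positions, then emit the optional leading segment and one slice per boundary-to-next-boundary range.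
import Mathlib
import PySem

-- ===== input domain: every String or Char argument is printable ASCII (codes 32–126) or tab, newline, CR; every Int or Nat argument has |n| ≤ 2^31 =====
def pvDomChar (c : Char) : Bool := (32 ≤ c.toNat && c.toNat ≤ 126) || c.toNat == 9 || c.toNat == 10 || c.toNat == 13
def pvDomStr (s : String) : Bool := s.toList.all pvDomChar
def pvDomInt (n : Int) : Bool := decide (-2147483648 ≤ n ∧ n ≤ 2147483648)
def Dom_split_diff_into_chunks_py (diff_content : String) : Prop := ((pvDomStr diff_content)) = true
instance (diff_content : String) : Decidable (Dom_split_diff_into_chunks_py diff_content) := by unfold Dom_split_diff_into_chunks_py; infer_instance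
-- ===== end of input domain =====

-- B replaces A's single flushing-accumulator line loop by an index table of 'diff --git'
-- boundary positions followed by slicing each boundary-to-boundary range (objective: alternative decomposition, same cost).

-- ===== PORT A =====
-- literal transliteration of A's loop; 'diff_content.split("\n")' is PySem.Str.split?,
-- always 'some' here because the separator "\n" is a non-empty literal
def split_diff_into_chunks_py (diff_content : String) : List String :=
  let st := ((PySem.Str.split? diff_content "\n").getD []).foldl
    (fun st line =>
      if PySem.Str.startswith line "diff --git" then
        (if st.2.isEmpty then st.1 else st.1 ++ [PySem.Str.join "\n" st.2], [line])
      else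
        (st.1, st.2 ++ [line]))
    ([], [])
  if st.2.isEmpty then st.1 else st.1 ++ [PySem.Str.join "\n" st.2]

-- ===== PORT B =====
-- literal transliteration of Source B: boundary-index table, then slices
def split_diff_into_chunks_py_alt (diff_content : String) : List String :=
  let lines := (PySem.Str.split? diff_content "\n").getD []
  let marks := ((PySem.List.enumerate lines).filter
      (fun p => PySem.Str.startswith p.2 "diff --git")).map (fun p => p.1)
  match marks with
  | [] => [PySem.Str.join "\n" lines]
  | m0 :: _ =>
    let bounds := marks ++ [(lines.length : Int)]
    let lead := if 0 < m0 then
        [PySem.Str.join "\n" (PySem.List.slice lines none (some m0))] else []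
    lead ++ (bounds.zip (PySem.List.slice bounds (some 1) none)).map
      (fun ab => PySem.Str.join "\n" (PySem.List.slice lines (some ab.1) (some ab.2)))

-- ===== PRECONDITION & SPEC =====
def Spec_split_diff_into_chunks_py (diff_content : String) (out : List String) : Prop := out = split_diff_into_chunks_py_alt diff_content
instance (diff_content : String) (out : List String) : Decidable (Spec_split_diff_into_chunks_py diff_content out) := by unfold Spec_split_diff_into_chunks_py; infer_instance

-- ===== CLAIM (what is proved, stated in full; the proofs are below) =====
def Claim_equal_split_diff_into_chunks_py : Prop := ∀ (diff_content : String), Dom_split_diff_into_chunks_py diff_content → Spec_split_diff_into_chunks_py diff_content (split_diff_into_chunks_py diff_content)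

-- ===== LEMMAS AND PROOFS =====

-- abbreviations for the pieces both ports are built from
def pvMark (l : String) : Bool := PySem.Str.startswith l "diff --git"

def pvJoin (xs : List String) : String := PySem.Str.join "\n" xs

def pvMarks (lines : List String) : List Int :=
  ((PySem.List.enumerate lines).filter (fun p => pvMark p.2)).map (fun p => p.1)

def pvChunk (lines : List String) (ab : Int × Int) : String :=
  pvJoin (PySem.List.slice lines (some ab.1) (some ab.2))

def pvPairChunks (lines : List String) : List String :=
  ((pvMarks lines ++ [(lines.length : Int)]).zip
    (pvMarks lines ++ [(lines.length : Int)]).tail).map (pvChunk lines)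

-- B's result, written over the already-split line list
def pvAltSpec (lines : List String) : List String :=
  match pvMarks lines with
  | [] => [pvJoin lines]
  | m0 :: _ =>
    (if 0 < m0 then [pvJoin (PySem.List.slice lines none (some m0))] else []) ++
      pvPairChunks lines

-- A's loop body and its flush
def pvAStep (st : List String × List String) (line : String) : List String × List String :=
  if PySem.Str.startswith line "diff --git" then
    (if st.2.isEmpty then st.1 else st.1 ++ [PySem.Str.join "\n" st.2], [line])
  else
    (st.1, st.2 ++ [line])

-- the common recursive description both ports are reduced to
def pvGojoin (cur : List String) : List String → List String
  | [] => [pvJoin cur]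
  | l :: ls => if pvMark l then pvJoin cur :: pvGojoin [l] ls else pvGojoin (cur ++ [l]) ls

def pvHeadTail (cur ls : List String) : List String :=
  match pvMarks ls with
  | [] => [pvJoin (cur ++ ls)]
  | m0 :: _ => pvJoin (cur ++ ls.take m0.toNat) :: pvPairChunks ls

theorem pv_enumerate_shift (ls : List String) (s : Int) :
    PySem.List.enumerate ls (s + 1) = (PySem.List.enumerate ls s).map (fun p => (p.1 + 1, p.2)) := by
  induction ls generalizing s with
  | nil => simp [PySem.List.enumerate_nil]
  | cons l ls ih =>
    simp only [PySem.List.enumerate_cons, List.map_cons]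
    rw [ih (s + 1)]

theorem pv_marks_cons (l : String) (ls : List String) :
    pvMarks (l :: ls) = (if pvMark l then [(0 : Int)] else []) ++ (pvMarks ls).map (· + 1) := by
  unfold pvMarks
  rw [show ((0 : Int)) = (0 : Int) from rfl, PySem.List.enumerate_cons,
    show (0 : Int) + 1 = 0 + 1 from rfl, pv_enumerate_shift ls 0]
  by_cases h : pvMark l <;>
    simp [h, List.filter_map, List.map_map, Function.comp_def]

theorem pv_marks_nonneg {ls : List String} {x : Int} (hx : x ∈ pvMarks ls) : 0 ≤ x := by
  induction ls generalizing x with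
  | nil => simp [pvMarks, PySem.List.enumerate_nil] at hx
  | cons l ls ih =>
    rw [pv_marks_cons] at hx
    rcases List.mem_append.1 hx with h | h
    · split at h <;> simp at h; omega
    · obtain ⟨y, hy, rfl⟩ := List.mem_map.1 h
      have := ih hy; omega

theorem pv_slice_succ (l : String) (ls : List String) {a b : Int} (ha : 0 ≤ a) (hb : 0 ≤ b) :
    PySem.List.slice (l :: ls) (some (a + 1)) (some (b + 1)) = PySem.List.slice ls (some a) (some b) := by
  rw [PySem.List.slice_toNat _ (by omega) (by omega), PySem.List.slice_toNat _ ha hb]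
  have h1 : (a + 1).toNat = a.toNat + 1 := by omega
  have h2 : (b + 1).toNat = b.toNat + 1 := by omega
  rw [h1, h2, List.drop_succ_cons]
  congr 1
  omega

theorem pv_pair_shift (l : String) (ls : List String) (bs : List Int) (hbs : ∀ x ∈ bs, 0 ≤ x) :
    ((bs.map (· + 1)).zip (bs.map (· + 1)).tail).map (pvChunk (l :: ls)) =
      (bs.zip bs.tail).map (pvChunk ls) := by
  have htail : (bs.map (· + 1)).tail = bs.tail.map (· + 1) := by cases bs <;> simp
  rw [htail, List.zip_map, List.map_map]
  refine List.map_congr_left ?_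
  intro ab hab
  obtain ⟨h1, h2⟩ := List.of_mem_zip hab
  have ha := hbs _ h1
  have hb := hbs _ (List.mem_of_mem_tail h2)
  simp only [Function.comp, Prod.map, pvChunk]
  rw [pv_slice_succ l ls ha hb]

theorem pv_bounds_nonneg (ls : List String) :
    ∀ x ∈ pvMarks ls ++ [(ls.length : Int)], 0 ≤ x := by
  intro x hx
  rcases List.mem_append.1 hx with h | h
  · exact pv_marks_nonneg h
  · simp at h; omega

theorem pv_pairChunks_cons_of_not_mark (l : String) (ls : List String) (hm : pvMark l = false) :
    pvPairChunks (l :: ls) = pvPairChunks ls := by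
  have hb : pvMarks (l :: ls) = (pvMarks ls).map (· + 1) := by rw [pv_marks_cons, hm]; simp
  have hlen : ((l :: ls).length : Int) = (ls.length : Int) + 1 := by simp
  unfold pvPairChunks
  rw [hb, hlen]
  rw [show ((pvMarks ls).map (· + 1) ++ [(ls.length : Int) + 1]) =
      (pvMarks ls ++ [(ls.length : Int)]).map (· + 1) by simp]
  exact pv_pair_shift l ls _ (pv_bounds_nonneg ls)

theorem pv_pairChunks_cons_of_mark (l : String) (ls : List String) (hm : pvMark l = true) :
    pvPairChunks (l :: ls) = pvHeadTail [l] ls := by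
  have hb : pvMarks (l :: ls) = 0 :: (pvMarks ls).map (· + 1) := by
    rw [pv_marks_cons, hm]; simp
  have hlen : ((l :: ls).length : Int) = (ls.length : Int) + 1 := by simp
  have hshift : (((pvMarks ls ++ [(ls.length : Int)]).map (· + 1)).zip
        ((pvMarks ls ++ [(ls.length : Int)]).map (· + 1)).tail).map (pvChunk (l :: ls)) =
      ((pvMarks ls ++ [(ls.length : Int)]).zip (pvMarks ls ++ [(ls.length : Int)]).tail).map
        (pvChunk ls) := pv_pair_shift l ls _ (pv_bounds_nonneg ls)
  unfold pvPairChunks pvHeadTail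
  rw [hb, hlen]
  rw [show (0 :: (pvMarks ls).map (· + 1) ++ [(ls.length : Int) + 1]) =
      0 :: ((pvMarks ls ++ [(ls.length : Int)]).map (· + 1)) by simp]
  cases hml : pvMarks ls with
  | nil =>
    simp only [hml, List.nil_append, List.map_cons, List.map_nil] at hshift ⊢
    simp only [List.zip, List.zipWith, List.tail]
    simp only [List.map_cons, List.map_nil]
    have hch : pvChunk (l :: ls) (0, (ls.length : Int) + 1) = pvJoin (l :: ls) := by
      simp only [pvChunk]
      rw [PySem.List.slice_toNat _ (by omega) (by omega)]
      have h1 : ((ls.length : Int) + 1).toNat = ls.length + 1 := by omega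
      simp [h1, pvJoin]
    simp [hch]
  | cons m0 rest =>
    have hm0 : (0 : Int) ≤ m0 := pv_marks_nonneg (hml ▸ List.mem_cons_self ..)
    rw [hml] at hshift
    simp only [List.map_cons, List.cons_append, List.map_append, List.map_cons] at hshift ⊢
    simp only [List.zip, List.zipWith, List.tail] at hshift ⊢
    have hch : pvChunk (l :: ls) (0, m0 + 1) = pvJoin (l :: ls.take m0.toNat) := by
      simp only [pvChunk]
      rw [PySem.List.slice_toNat _ (by omega) (by omega)]
      have h1 : (m0 + 1).toNat = m0.toNat + 1 := by omega
      simp [h1, pvJoin]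
    rw [List.map_cons, hch, hshift]
    unfold pvPairChunks
    rw [hml]
    simp [List.zip]

theorem pv_gojoin_eq_headTail (ls : List String) : ∀ cur, pvGojoin cur ls = pvHeadTail cur ls := by
  induction ls with
  | nil =>
    intro cur
    simp [pvGojoin, pvHeadTail, pvMarks, PySem.List.enumerate_nil]
  | cons l ls ih =>
    intro cur
    cases hm : pvMark l with
    | true =>
      have : pvGojoin cur (l :: ls) = pvJoin cur :: pvGojoin [l] ls := by
        simp [pvGojoin, hm]
      rw [this, ih [l], ← pv_pairChunks_cons_of_mark l ls hm]
      unfold pvHeadTail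
      have hb : pvMarks (l :: ls) = 0 :: (pvMarks ls).map (· + 1) := by
        rw [pv_marks_cons, hm]; simp
      simp [hb]
    | false =>
      have : pvGojoin cur (l :: ls) = pvGojoin (cur ++ [l]) ls := by
        simp [pvGojoin, hm]
      rw [this, ih (cur ++ [l])]
      unfold pvHeadTail
      have hb : pvMarks (l :: ls) = (pvMarks ls).map (· + 1) := by
        rw [pv_marks_cons, hm]; simp
      cases hml : pvMarks ls with
      | nil => simp [hb, hml]
      | cons m0 rest =>
        have hm0 : (0 : Int) ≤ m0 := pv_marks_nonneg (hml ▸ List.mem_cons_self ..)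
        simp only [hb, hml, List.map_cons]
        have h1 : (m0 + 1).toNat = m0.toNat + 1 := by omega
        rw [pv_pairChunks_cons_of_not_mark l ls hm]
        simp [h1]

theorem pv_foldl_eq_gojoin (ls : List String) :
    ∀ (chunks cur : List String), cur ≠ [] →
      (let st := ls.foldl pvAStep (chunks, cur);
        if st.2.isEmpty then st.1 else st.1 ++ [pvJoin st.2]) = chunks ++ pvGojoin cur ls := by
  induction ls with
  | nil =>
    intro chunks cur hcur
    simp [pvGojoin, List.isEmpty_iff, hcur, pvJoin]
  | cons l ls ih =>
    intro chunks cur hcur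
    cases hm : pvMark l with
    | true =>
      have hstep : pvAStep (chunks, cur) l = (chunks ++ [pvJoin cur], [l]) := by
        simp [pvAStep, pvMark] at hm ⊢
        simp [hm, hcur, pvJoin]
      simp only [List.foldl_cons, hstep]
      rw [ih (chunks ++ [pvJoin cur]) [l] (by simp)]
      simp [pvGojoin, hm]
    | false =>
      have hstep : pvAStep (chunks, cur) l = (chunks, cur ++ [l]) := by
        simp [pvAStep, pvMark] at hm ⊢
        simp [hm]
      simp only [List.foldl_cons, hstep]
      rw [ih chunks (cur ++ [l]) (by simp)]
      simp [pvGojoin, hm]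

theorem pv_go_ne_nil (sep : List Char) :
    ∀ (fuel : Nat) (l cur : List Char) (acc : List (List Char)),
      PySem.Chars.splitOn.go sep fuel l cur acc ≠ [] := by
  intro fuel
  induction fuel with
  | zero => intro l cur acc; simp [PySem.Chars.splitOn.go]
  | succ n ih =>
    intro l cur acc
    cases l with
    | nil => simp [PySem.Chars.splitOn.go]
    | cons c rest =>
      rw [PySem.Chars.splitOn.go]
      split
      · exact ih _ _ _
      · exact ih _ _ _

theorem pv_lines_ne_nil (d : String) : (PySem.Str.split? d "\n").getD [] ≠ [] := by
  have h := PySem.Str.split?_map d "\n"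
  rw [show ("\n" : String).toList = ['\n'] from rfl,
    show PySem.Chars.split? d.toList ['\n'] = some (PySem.Chars.splitOn d.toList ['\n']) by
      simp [PySem.Chars.split?]] at h
  obtain ⟨m, hm, hmap⟩ := Option.map_eq_some_iff.1 h
  rw [hm, Option.getD_some]
  intro hnil
  rw [hnil, List.map_nil] at hmap
  refine pv_go_ne_nil ['\n'] (d.toList.length + 1) d.toList [] [] ?_
  rw [show PySem.Chars.splitOn d.toList ['\n'] =
      PySem.Chars.splitOn.go ['\n'] (d.toList.length + 1) d.toList [] [] from rfl] at hmap
  exact hmap.symm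

-- bridge: port B equals pvAltSpec of the split lines
theorem pv_alt_eq (d : String) :
    split_diff_into_chunks_py_alt d = pvAltSpec ((PySem.Str.split? d "\n").getD []) := by
  unfold split_diff_into_chunks_py_alt pvAltSpec
  cases h : pvMarks ((PySem.Str.split? d "\n").getD []) with
  | nil =>
    unfold pvMarks pvMark at h
    simp only [h, pvJoin]
  | cons m0 rest =>
    unfold pvMarks pvMark at h
    simp only [h, pvJoin, pvPairChunks]
    rw [PySem.List.slice_from_one]
    unfold pvMarks pvMark
    rw [h]
    rfl

-- B on a non-empty line list equals the common description
theorem pv_altSpec_cons (l : String) (ls : List String) :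
    pvAltSpec (l :: ls) = pvHeadTail [l] ls := by
  unfold pvAltSpec pvHeadTail
  cases hm : pvMark l with
  | true =>
    have hb : pvMarks (l :: ls) = 0 :: (pvMarks ls).map (· + 1) := by
      rw [pv_marks_cons, hm]; simp
    rw [hb]
    simp only [if_neg (lt_irrefl (0 : Int)), List.nil_append]
    rw [pv_pairChunks_cons_of_mark l ls hm]
    unfold pvHeadTail
    rfl
  | false =>
    have hb : pvMarks (l :: ls) = (pvMarks ls).map (· + 1) := by
      rw [pv_marks_cons, hm]; simp
    cases hml : pvMarks ls with
    | nil => rw [hb, hml]; simp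
    | cons m0 rest =>
      have hm0 : (0 : Int) ≤ m0 := pv_marks_nonneg (hml ▸ List.mem_cons_self ..)
      rw [hb, hml]
      simp only [List.map_cons]
      rw [if_pos (by omega : (0:Int) < m0 + 1)]
      rw [pv_pairChunks_cons_of_not_mark l ls hm]
      rw [PySem.List.slice_to _ (by omega)]
      have h1 : (m0 + 1).toNat = m0.toNat + 1 := by omega
      simp [h1]

-- bridge: port A equals the common description
theorem pv_a_eq (d : String) (l : String) (ls : List String)
    (h : (PySem.Str.split? d "\n").getD [] = l :: ls) :
    split_diff_into_chunks_py d = pvGojoin [l] ls := by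
  unfold split_diff_into_chunks_py
  rw [show (fun (st : List String × List String) line =>
      if PySem.Str.startswith line "diff --git" then
        (if st.2.isEmpty then st.1 else st.1 ++ [PySem.Str.join "\n" st.2], [line])
      else (st.1, st.2 ++ [line])) = pvAStep from rfl]
  rw [h, List.foldl_cons]
  have hfirst : pvAStep ([], []) l = ([], [l]) := by
    unfold pvAStep
    split <;> simp
  rw [hfirst]
  have := pv_foldl_eq_gojoin ls [] [l] (by simp)
  simpa [pvJoin] using this

-- ===== VERDICT (by name: the statement is the Claim_ definition above) =====
theorem split_diff_into_chunks_py_spec : Claim_equal_split_diff_into_chunks_py := by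
  intro d _
  unfold Spec_split_diff_into_chunks_py
  obtain ⟨l, ls, h⟩ : ∃ l ls, (PySem.Str.split? d "\n").getD [] = l :: ls := by
    cases hc : (PySem.Str.split? d "\n").getD [] with
    | nil => exact absurd hc (pv_lines_ne_nil d)
    | cons a b => exact ⟨a, b, rfl⟩
  rw [pv_a_eq d l ls h, pv_alt_eq d, h, pv_altSpec_cons, pv_gojoin_eq_headTail]
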